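-- pv_equiv track=rewrite | github.com/FriedrichF/TheoInf | Uebung2-3.py | ListGetElement
-- ===== SOURCE A (Python) =====
-- def ListGetLength(l): #Anzahl Listenelemente zurückliefern
--   count = 0
--   merker = l
--   while (merker >= 2):
--     z1 = binTestBit(merker,1)
--     merker = divtwo(merker)
--     z2 = binTestBit(merker,1)
--     merker = divtwo(merker)
--     if ((z1 == 0) and (z2 == 1)):
--       count = (count + 1)
--   return (count - 1)
--
-- def ListGetElement(l,i):
--   count = 0
--   wertigkeit = 1
--   summe = 0
--   ret = 0
--   listLength = ListGetLength(l)
--   if (listLength >= 1):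
--     merker = l
--     while (merker >= 2):
--       z1 = binTestBit(merker,1)
--       merker = divtwo(merker)
--       z2 = binTestBit(merker,1)
--       merker = divtwo(merker)
--       if ((z2 == 1) and (z1 == 0)):
--         if (count >= 1):
--           if (((listLength - i) + 1) == count):
--             ret = summe
--         count = (count + 1)
--         summe = 0
--         wertigkeit = 1
--       if ((z1 == 1) and (z2 == 1)):
--         summe = (summe + prodZ(z1,wertigkeit))
--         wertigkeit = (wertigkeit + wertigkeit)
--       if ((z1 == 0) and (z2 == 0)):
--         wertigkeit = (wertigkeit + wertigkeit)
--   return ret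
--
-- def prodZ(x,y):
--   [i,z] = [0,0] # Initialisierung
--   if (x < 0):
--     x = (0 - x) # negatives Vorzeichen von x entfernen
--     y = (0 - y) # und auf y übertragen
--   for i in range(0,x): # x Schleifendurchläufe
--     z = (z + y) # y wird x-mal zu z addiert
--   return z
--
-- def divtwo(x):
--   z = 0
--   if (x <= 0):
--     z = 0
--   if (x > 0):
--     while (x >= 2):
--       z = (z + 1)
--       x = (x - 2)
--   return z
--
-- def binTestBit(n,stelle):
--   ret = 0
--   iStelle = 0
--   if (n <= 0):
--     ret = 0
--   while ((n > 0) and (stelle > iStelle)):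
--     iStelle = (iStelle + 1)
--     p = 0
--     zahl = divtwo(n)
--     for i in range(0, zahl):
--       p = (p + 2)
--     ret = (n - p)
--     n = zahl
--   return ret
-- ===== SOURCE B (Python) =====
-- def ListGetElement(l, i):
--     # One forward scan collecting completed elements, then a single index lookup.
--     elems = []
--     summe = 0
--     wert = 1
--     nsep = 0
--     m = l
--     while m >= 2:
--         pair = m % 4
--         m //= 4
--         if pair == 2:           # separator bits (z1=0, z2=1)
--             if nsep >= 1:
--                 elems.append(summe)
--             nsep += 1
--             summe = 0
--             wert = 1
--         elif pair == 3:         # data bit 1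
--             summe += wert
--             wert += wert
--         elif pair == 0:         # data bit 0
--             wert += wert
--     listLength = nsep - 1
--     if listLength >= 1:
--         idx = listLength - i
--         if 0 <= idx < len(elems):
--             return elems[idx]
--     return 0
-- ===== Notes on version B (the rewrite author's own statement) =====
-- stated objective: faster
-- what changed: A decodes the bit-pairs of l twice (once to count separators, once more selecting the answer inside the loop via a count condition), doing every halving and bit-test by repeated-subtraction helper loops; B makes one forward scan using native % and // that collects the completed element values into a list plus the separator count, then answers with a single bounds-checked index lookup.
import Mathlib
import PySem

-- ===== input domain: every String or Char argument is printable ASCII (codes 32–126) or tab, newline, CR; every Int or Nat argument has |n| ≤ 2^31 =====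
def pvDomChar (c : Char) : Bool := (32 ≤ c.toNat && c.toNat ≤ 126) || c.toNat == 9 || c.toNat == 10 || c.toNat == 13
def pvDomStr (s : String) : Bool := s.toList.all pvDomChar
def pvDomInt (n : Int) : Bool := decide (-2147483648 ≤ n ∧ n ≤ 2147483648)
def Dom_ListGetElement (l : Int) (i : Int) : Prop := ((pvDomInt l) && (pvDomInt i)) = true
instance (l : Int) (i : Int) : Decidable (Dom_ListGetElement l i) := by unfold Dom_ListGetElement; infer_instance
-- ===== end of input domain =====

-- B replaces A's second full decode pass and in-loop selection by one scan that collects the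
-- completed elements into a list and then does a single index lookup (objective: alternative).

-- ===== PORT A =====
-- while (x >= 2): z += 1; x -= 2
def divtwoLoop (z x : Int) : Int :=
  if 2 ≤ x then divtwoLoop (z + 1) (x - 2) else z
termination_by x.toNat
decreasing_by omega

def divtwo (x : Int) : Int :=
  if 0 < x then divtwoLoop 0 x else 0

-- characterisation needed by the termination proofs of the loops below
theorem divtwoLoop_eq (x z : Int) (hx : 0 ≤ x) : divtwoLoop z x = z + x / 2 := by
  induction hn : x.toNat using Nat.strong_induction_on generalizing x z with
  | _ n ih =>
    rw [divtwoLoop]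
    split
    · rw [ih (x - 2).toNat (by omega) (x - 2) (z + 1) (by omega) rfl]; omega
    · omega

theorem divtwo_eq (x : Int) : divtwo x = if 0 < x then x / 2 else 0 := by
  unfold divtwo
  split
  · rw [divtwoLoop_eq _ _ (by omega)]; omega
  · rfl

theorem divtwo_divtwo_toNat_lt (m : Int) (h : 2 ≤ m) :
    (divtwo (divtwo m)).toNat < m.toNat := by
  rw [divtwo_eq, divtwo_eq]
  split <;> split <;> omega

def prodZ (x y : Int) : Int :=
  let p := if x < 0 then (0 - x, 0 - y) else (x, y)
  (PySem.List.pyRange 0 p.1 1).foldl (fun z _ => z + p.2) 0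

def binTestBitLoop (n stelle iStelle ret : Int) : Int :=
  if 0 < n ∧ iStelle < stelle then
    let zahl := divtwo n
    let p := (PySem.List.pyRange 0 zahl 1).foldl (fun p _ => p + 2) 0
    binTestBitLoop zahl stelle (iStelle + 1) (n - p)
  else ret
termination_by (stelle - iStelle).toNat
decreasing_by omega

def binTestBit (n stelle : Int) : Int := binTestBitLoop n stelle 0 0

def lglLoop (merker count : Int) : Int :=
  if 2 ≤ merker then
    let z1 := binTestBit merker 1
    let m1 := divtwo merker
    let z2 := binTestBit m1 1
    let m2 := divtwo m1
    lglLoop m2 (if z1 = 0 ∧ z2 = 1 then count + 1 else count)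
  else count
termination_by merker.toNat
decreasing_by exact divtwo_divtwo_toNat_lt _ (by omega)

def ListGetLength (l : Int) : Int := lglLoop l 0 - 1

def ALoop (L i merker count wert summe ret : Int) : Int :=
  if 2 ≤ merker then
    let z1 := binTestBit merker 1
    let m1 := divtwo merker
    let z2 := binTestBit m1 1
    let m2 := divtwo m1
    let s1 : Int × Int × Int × Int :=
      if z2 = 1 ∧ z1 = 0 then
        (count + 1, 1, 0, if 1 ≤ count ∧ (L - i) + 1 = count then summe else ret)
      else (count, wert, summe, ret)
    let s2 : Int × Int :=
      if z1 = 1 ∧ z2 = 1 then (s1.2.1 + s1.2.1, s1.2.2.1 + prodZ z1 s1.2.1)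
      else (s1.2.1, s1.2.2.1)
    let w3 : Int := if z1 = 0 ∧ z2 = 0 then s2.1 + s2.1 else s2.1
    ALoop L i m2 s1.1 w3 s2.2 s1.2.2.2
  else ret
termination_by merker.toNat
decreasing_by exact divtwo_divtwo_toNat_lt _ (by omega)

def ListGetElement (l : Int) (i : Int) : Int :=
  let listLength := ListGetLength l
  if 1 ≤ listLength then ALoop listLength i l 0 1 0 0 else 0

-- ===== PORT B =====
def BLoop (m summe wert nsep : Int) (elems : List Int) : List Int × Int :=
  if 2 ≤ m then
    let pair := PySem.Int.mod m 4
    let m' := PySem.Int.floordiv m 4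
    if pair = 2 then
      BLoop m' 0 1 (nsep + 1) (if 1 ≤ nsep then elems ++ [summe] else elems)
    else if pair = 3 then
      BLoop m' (summe + wert) (wert + wert) nsep elems
    else if pair = 0 then
      BLoop m' summe (wert + wert) nsep elems
    else
      BLoop m' summe wert nsep elems
  else (elems, nsep)
termination_by m.toNat
decreasing_by
  all_goals
    rw [PySem.Int.floordiv_eq_ediv_of_pos (by omega : (0:Int) < 4)]
    omega

def ListGetElement_alt (l : Int) (i : Int) : Int :=
  let r := BLoop l 0 1 0 []
  let elems := r.1
  let listLength := r.2 - 1
  if 1 ≤ listLength then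
    let idx := listLength - i
    if 0 ≤ idx ∧ idx < (elems.length : Int) then
      match PySem.List.pyGet? elems idx with
      | some v => v
      | none => 0
    else 0
  else 0

-- ===== PRECONDITION & SPEC =====
def Spec_ListGetElement (l : Int) (i : Int) (out : Int) : Prop := out = ListGetElement_alt l i
instance (l : Int) (i : Int) (out : Int) : Decidable (Spec_ListGetElement l i out) := by unfold Spec_ListGetElement; infer_instance

-- ===== CLAIM (what is proved, stated in full; the proofs are below) =====
def Claim_equal_ListGetElement : Prop := ∀ (l : Int) (i : Int), Dom_ListGetElement l i → Spec_ListGetElement l i (ListGetElement l i)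

-- ===== LEMMAS AND PROOFS =====

-- the selection B performs at the end, as a function used only by the proofs
def sel (t : Int) (e : List Int) : Int :=
  if 0 ≤ t then (e[t.toNat]?).getD 0 else 0

theorem sel_concat_self (e : List Int) (s : Int) : sel (e.length : Int) (e ++ [s]) = s := by
  simp [sel]

theorem sel_concat_ne (t : Int) (e : List Int) (s : Int) (h : t ≠ (e.length : Int)) :
    sel t (e ++ [s]) = sel t e := by
  unfold sel
  split
  · rename_i ht
    rcases Nat.lt_trichotomy t.toNat e.length with hlt | heq | hgt
    · rw [List.getElem?_append_left hlt]
    · omega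
    · rw [List.getElem?_eq_none (by simp; omega), List.getElem?_eq_none (by omega)]
  · rfl

theorem fold_add2 (L : List Int) (a : Int) :
    L.foldl (fun p _ => p + 2) a = a + 2 * L.length := by
  induction L generalizing a with
  | nil => simp
  | cons x xs ih => simp [List.foldl, ih]; ring

theorem binTestBit_one (m : Int) (hm : 0 < m) : binTestBit m 1 = m % 2 := by
  unfold binTestBit
  rw [binTestBitLoop, if_pos (show 0 < m ∧ (0:Int) < 1 from ⟨hm, by norm_num⟩)]
  simp only
  rw [binTestBitLoop, if_neg (by omega)]
  rw [fold_add2, PySem.List.length_pyRange_one, divtwo_eq, if_pos hm]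
  omega

theorem prodZ_one (w : Int) : prodZ 1 w = w := by
  unfold prodZ
  norm_num
  rw [show PySem.List.pyRange 0 1 1 = [0] from PySem.List.pyRange_one_singleton 0]
  simp

-- one decode step: A's (z1, z2, next merker) in terms of B's (pair, next m)
theorem step_z1 (m : Int) (h : 2 ≤ m) : binTestBit m 1 = m % 2 := binTestBit_one m (by omega)
theorem step_m1 (m : Int) (h : 2 ≤ m) : divtwo m = m / 2 := by rw [divtwo_eq]; omega
theorem step_z2 (m : Int) (h : 2 ≤ m) : binTestBit (divtwo m) 1 = (m / 2) % 2 := by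
  rw [step_m1 m h]; exact binTestBit_one _ (by omega)
theorem step_m2 (m : Int) (h : 2 ≤ m) : divtwo (divtwo m) = m / 4 := by
  rw [step_m1 m h, divtwo_eq, if_pos (by omega)]
  omega

-- the separator count is the same in lglLoop and BLoop, whatever summe/wert/elems are
theorem lgl_eq_bloop (m : Int) : ∀ (count summe wert : Int) (elems : List Int),
    lglLoop m count = (BLoop m summe wert count elems).2 := by
  induction hn : m.toNat using Nat.strong_induction_on generalizing m with
  | _ n ih0 =>
    have ih : ∀ k : Int, k.toNat < m.toNat → ∀ (count summe wert : Int) (elems : List Int),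
        lglLoop k count = (BLoop k summe wert count elems).2 :=
      fun k hk => ih0 k.toNat (by omega) k rfl
    intro count summe wert elems
    rw [lglLoop, BLoop]
    by_cases h : 2 ≤ m
    · simp only [if_pos h]
      rw [step_z1 m h, step_z2 m h]
      rw [PySem.Int.mod_eq_emod_of_pos (by omega : (0:Int) < 4),
          PySem.Int.floordiv_eq_ediv_of_pos (by omega : (0:Int) < 4)]
      have hrec := ih (m / 4) (by omega)
      have h2 : divtwo (divtwo m) = m / 4 := step_m2 m h
      by_cases hp2 : m % 4 = 2
      · rw [if_pos (by omega), if_pos hp2, h2, hrec]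
      · rw [if_neg (by omega), if_neg hp2, h2]
        by_cases hp3 : m % 4 = 3
        · rw [if_pos hp3, hrec]
        · rw [if_neg hp3]
          by_cases hp0 : m % 4 = 0
          · rw [if_pos hp0, hrec]
          · rw [if_neg hp0, hrec]
    · simp [h]

-- the core invariant: A's running ret is B's selection from the elements collected so far
theorem aloop_eq_sel (m : Int) : ∀ (L i count wert summe : Int) (elems : List Int),
    0 ≤ count → (elems.length : Int) = max (count - 1) 0 →
    ALoop L i m count wert summe (sel (L - i) elems)
      = sel (L - i) (BLoop m summe wert count elems).1 := by
  induction hn : m.toNat using Nat.strong_induction_on generalizing m with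
  | _ n ih0 =>
    have ih : ∀ k : Int, k.toNat < m.toNat → ∀ (L i count wert summe : Int) (elems : List Int),
        0 ≤ count → (elems.length : Int) = max (count - 1) 0 →
        ALoop L i k count wert summe (sel (L - i) elems)
          = sel (L - i) (BLoop k summe wert count elems).1 :=
      fun k hk => ih0 k.toNat (by omega) k rfl
    intro L i count wert summe elems hc hlen
    rw [ALoop, BLoop]
    by_cases h : 2 ≤ m
    · simp only [if_pos h]
      rw [step_z1 m h, step_z2 m h, step_m2 m h]
      rw [PySem.Int.mod_eq_emod_of_pos (by omega : (0:Int) < 4),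
          PySem.Int.floordiv_eq_ediv_of_pos (by omega : (0:Int) < 4)]
      have hrec := ih (m / 4) (by omega) L i
      by_cases hp2 : m % 4 = 2
      · -- separator
        rw [if_pos hp2]
        rw [if_pos (by omega : (m / 2) % 2 = 1 ∧ m % 2 = 0)]
        rw [if_neg (by omega : ¬ (m % 2 = 1 ∧ (m / 2) % 2 = 1))]
        rw [if_neg (by omega : ¬ (m % 2 = 0 ∧ (m / 2) % 2 = 0))]
        simp only
        by_cases hc1 : 1 ≤ count
        · rw [if_pos hc1]
          have hnew : (if 1 ≤ count ∧ L - i + 1 = count then summe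
              else sel (L - i) elems) = sel (L - i) (elems ++ [summe]) := by
            by_cases hhit : L - i + 1 = count
            · rw [if_pos ⟨hc1, hhit⟩,
                  show L - i = (elems.length : Int) by omega, sel_concat_self]
            · rw [if_neg (by tauto), sel_concat_ne _ _ _ (by omega)]
          rw [hnew, hrec (count + 1) 1 0 (elems ++ [summe]) (by omega) (by simp; omega)]
        · rw [if_neg hc1, if_neg (by omega)]
          rw [hrec (count + 1) 1 0 elems (by omega) (by omega)]
      · rw [if_neg hp2]
        rw [if_neg (by omega : ¬ ((m / 2) % 2 = 1 ∧ m % 2 = 0))]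
        simp only
        by_cases hp3 : m % 4 = 3
        · rw [if_pos hp3, if_pos (by omega : m % 2 = 1 ∧ (m / 2) % 2 = 1)]
          rw [if_neg (by omega : ¬ (m % 2 = 0 ∧ (m / 2) % 2 = 0))]
          simp only
          rw [show m % 2 = 1 by omega, prodZ_one]
          exact hrec count (wert + wert) (summe + wert) elems hc hlen
        · rw [if_neg hp3, if_neg (by omega : ¬ (m % 2 = 1 ∧ (m / 2) % 2 = 1))]
          simp only
          by_cases hp0 : m % 4 = 0
          · rw [if_pos hp0, if_pos (by omega : m % 2 = 0 ∧ (m / 2) % 2 = 0)]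
            exact hrec count (wert + wert) summe elems hc hlen
          · rw [if_neg hp0, if_neg (by omega : ¬ (m % 2 = 0 ∧ (m / 2) % 2 = 0))]
            exact hrec count wert summe elems hc hlen
    · simp [h]

theorem sel_eq_b_lookup (t : Int) (e : List Int) :
    sel t e = (if 0 ≤ t ∧ t < (e.length : Int) then
      match PySem.List.pyGet? e t with
      | some v => v
      | none => 0
    else 0) := by
  unfold sel
  by_cases ht : 0 ≤ t
  · by_cases hlt : t < (e.length : Int)
    · rw [if_pos ht, if_pos ⟨ht, hlt⟩, PySem.List.pyGet?_of_nonneg (xs := e) ht,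
          List.getElem?_eq_getElem (by omega : t.toNat < e.length)]
      rfl
    · rw [if_pos ht, if_neg (by tauto), List.getElem?_eq_none (by omega)]
      rfl
  · rw [if_neg ht, if_neg (by tauto)]

-- ===== VERDICT (by name: the statement is the Claim_ definition above) =====
theorem ListGetElement_spec : Claim_equal_ListGetElement := by
  intro l i _
  unfold Spec_ListGetElement ListGetElement ListGetElement_alt ListGetLength
  simp only
  rw [lgl_eq_bloop l 0 0 1 []]
  set r := BLoop l 0 1 0 [] with hr
  by_cases hL : 1 ≤ r.2 - 1
  · rw [if_pos hL, if_pos hL]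
    have := aloop_eq_sel l (r.2 - 1) i 0 1 0 [] (by omega) (by simp)
    rw [show sel (r.2 - 1 - i) [] = 0 by simp [sel]] at this
    rw [this, ← hr, sel_eq_b_lookup]
  · rw [if_neg hL, if_neg hL]
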